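-- pv_equiv track=rewrite | github.com/sobjornstad/tabularium | db/entries.py | exciseUnquotedCommas
-- ===== SOURCE A (Python) =====
-- def exciseUnquotedCommas(s: str) -> str:
--     """
--     Remove any commas that aren't inside double quotes from the string /s/.
--     This may be desirable because of the dual role of the filter box in the UI
--     in both searching for and creating entries -- the user won't want to leave
--     out this extremely common punctuation since then they'll have to edit it
--     again if they don't find anything, but if they leave it in FTS5 will error
--     without this adjustment.
--
--     >>> exciseUnquotedCommas('Bjornstad, Soren')
--     'Bjornstad Soren'
--
--     >>> exciseUnquotedCommas('"Bjornstad, Soren"')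
--     '"Bjornstad, Soren"'
--
--     >>> exciseUnquotedCommas(",")
--     ''
--
--     >>> exciseUnquotedCommas('comma, and "comma, quoted"')
--     'comma and "comma, quoted"'
--
--     # a classic from Cross's _Indexing Books_
--     >>> exciseUnquotedCommas('"diet, anus, artificial, patients with, for"')
--     '"diet, anus, artificial, patients with, for"'
--
--     >>> exciseUnquotedCommas('diet, anus, artificial, patients with, for')
--     'diet anus artificial patients with for'
--     """
--     inQuotes = False
--     newStringParts = []
--     for i in s.split('"'):
--         if not inQuotes:
--             newStringParts.append(i.replace(',', ''))
--         else:
--             newStringParts.append(i)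
--         inQuotes = not inQuotes
--     return '"'.join(newStringParts)
-- ===== SOURCE B (Python) =====
-- def exciseUnquotedCommas(s: str) -> str:
--     """Single character-by-character scan: keep every char except commas
--     that occur while outside double quotes (quote parity toggles)."""
--     inQuotes = False
--     out = []
--     for c in s:
--         if c == '"':
--             inQuotes = not inQuotes
--             out.append(c)
--         elif c != ',' or inQuotes:
--             out.append(c)
--     return ''.join(out)
-- ===== Notes on version B (the rewrite author's own statement) =====
-- stated objective: idiomatic
-- what changed: Replaced the split-on-quote / alternate-replace / rejoin pipeline by a single character scan that toggles an inQuotes flag and appends to one output buffer.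
import Mathlib
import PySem

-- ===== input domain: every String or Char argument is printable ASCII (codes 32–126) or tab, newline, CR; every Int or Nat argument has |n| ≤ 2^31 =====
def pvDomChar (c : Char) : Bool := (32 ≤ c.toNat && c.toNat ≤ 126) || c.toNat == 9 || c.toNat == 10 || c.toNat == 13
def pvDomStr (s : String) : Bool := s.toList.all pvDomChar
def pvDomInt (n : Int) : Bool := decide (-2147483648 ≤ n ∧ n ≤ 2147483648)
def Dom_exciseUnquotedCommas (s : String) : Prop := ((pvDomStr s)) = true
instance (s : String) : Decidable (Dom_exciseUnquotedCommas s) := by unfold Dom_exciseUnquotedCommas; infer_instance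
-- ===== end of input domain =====

-- B rewrites A's split-on-quote / alternate-replace / rejoin pipeline as a single
-- character scan toggling an inQuotes flag (objective: idiomatic; same O(n) cost).

-- ===== PORT A =====
-- A: split on '"', replace ',' by '' in the even-indexed (unquoted) pieces, rejoin with '"'.
-- loop body: newStringParts.append(i.replace(',','') if not inQuotes else i); inQuotes = not inQuotes
def pvAStep (st : Bool × List (List Char)) (i : List Char) : Bool × List (List Char) :=
  (!st.1, st.2 ++ [if st.1 then i else PySem.Chars.replace i [','] []])

def exciseUnquotedCommas (s : String) : String :=
  let parts := PySem.Chars.splitOn s.toList ['"']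
  let st := parts.foldl pvAStep (false, [])
  String.ofList (PySem.Chars.join ['"'] st.2)

-- ===== PORT B =====
-- B: one pass over the characters, flag for quote parity, single output buffer.
-- loop body: if c=='"' flip flag and append; elif c!=',' or inQuotes append; else drop
def pvBStep (st : Bool × List Char) (c : Char) : Bool × List Char :=
  if c == '"' then (!st.1, st.2 ++ [c])
  else if c != ',' || st.1 then (st.1, st.2 ++ [c])
  else st

def exciseUnquotedCommas_alt (s : String) : String :=
  let st := s.toList.foldl pvBStep (false, [])
  String.ofList st.2

-- ===== PRECONDITION & SPEC =====
def Spec_exciseUnquotedCommas (s : String) (out : String) : Prop := out = exciseUnquotedCommas_alt s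
instance (s : String) (out : String) : Decidable (Spec_exciseUnquotedCommas s out) := by unfold Spec_exciseUnquotedCommas; infer_instance

-- ===== CLAIM (what is proved, stated in full; the proofs are below) =====
def Claim_equal_exciseUnquotedCommas : Prop := ∀ (s : String), Dom_exciseUnquotedCommas s → Spec_exciseUnquotedCommas s (exciseUnquotedCommas s)

-- ===== LEMMAS AND PROOFS =====

/-- Reference form of B: what the scan appends. -/
def pvScan : List Char → Bool → List Char
  | [], _ => []
  | c :: cs, b =>
    if c = '"' then c :: pvScan cs (!b)
    else if c = ',' ∧ b = false then pvScan cs b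
    else c :: pvScan cs b

/-- Reference form of `replace i [','] []`. -/
def pvRemoveC : List Char → List Char
  | [] => []
  | c :: cs => if c = ',' then pvRemoveC cs else c :: pvRemoveC cs

/-- Reference form of splitting on '"' with a reversed current-piece accumulator. -/
def pvSplitA : List Char → List Char → List (List Char)
  | [], cur => [cur.reverse]
  | c :: rest, cur =>
    if c = '"' then cur.reverse :: pvSplitA rest [] else pvSplitA rest (c :: cur)

/-- What A's fold does to the pieces: alternately strip commas, starting unquoted. -/
def pvAltMap : List (List Char) → Bool → List (List Char)
  | [], _ => []
  | p :: ps, b => (if b then p else pvRemoveC p) :: pvAltMap ps (!b)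

theorem pvRemoveC_append (l₁ l₂ : List Char) :
    pvRemoveC (l₁ ++ l₂) = pvRemoveC l₁ ++ pvRemoveC l₂ := by
  induction l₁ with
  | nil => simp [pvRemoveC]
  | cons c cs ih => by_cases h : c = ',' <;> simp [pvRemoveC, h, ih]

theorem pvReplaceGo_eq (fuel : Nat) (l acc : List Char) (h : l.length ≤ fuel) :
    PySem.Chars.replace.go [','] [] fuel l acc = acc.reverse ++ pvRemoveC l := by
  induction fuel generalizing l acc with
  | zero =>
    have : l = [] := List.eq_nil_of_length_eq_zero (Nat.le_zero.mp h)
    subst this; simp [PySem.Chars.replace.go, pvRemoveC]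
  | succ n ih =>
    cases l with
    | nil => simp [PySem.Chars.replace.go, pvRemoveC]
    | cons c t =>
      simp only [List.length_cons, Nat.succ_le_succ_iff] at h
      by_cases hc : c = ','
      · subst hc
        rw [show PySem.Chars.replace.go [','] [] (n+1) (',' :: t) acc
              = PySem.Chars.replace.go [','] [] n t acc from by
            simp [PySem.Chars.replace.go, List.isPrefixOf]]
        simp [ih t acc h, pvRemoveC]
      · rw [show PySem.Chars.replace.go [','] [] (n+1) (c :: t) acc
              = PySem.Chars.replace.go [','] [] n t (c :: acc) from by
            simp [PySem.Chars.replace.go, List.isPrefixOf, Ne.symm hc]]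
        simp [ih t (c :: acc) h, pvRemoveC, hc]

theorem pvReplace_eq (l : List Char) :
    PySem.Chars.replace l [','] [] = pvRemoveC l := by
  have := pvReplaceGo_eq l.length l [] (le_refl _)
  simpa [PySem.Chars.replace] using this

theorem pvSplitGo_eq (fuel : Nat) (l cur : List Char) (acc : List (List Char))
    (h : l.length ≤ fuel) :
    PySem.Chars.splitOn.go ['"'] fuel l cur acc = acc.reverse ++ pvSplitA l cur := by
  induction fuel generalizing l cur acc with
  | zero =>
    have : l = [] := List.eq_nil_of_length_eq_zero (Nat.le_zero.mp h)
    subst this; simp [PySem.Chars.splitOn.go, pvSplitA]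
  | succ n ih =>
    cases l with
    | nil => simp [PySem.Chars.splitOn.go, pvSplitA]
    | cons c rest =>
      simp only [List.length_cons, Nat.succ_le_succ_iff] at h
      by_cases hc : c = '"'
      · subst hc
        rw [show PySem.Chars.splitOn.go ['"'] (n+1) ('"' :: rest) cur acc
              = PySem.Chars.splitOn.go ['"'] n rest [] (cur.reverse :: acc) from by
            simp [PySem.Chars.splitOn.go, List.isPrefixOf]]
        simp [ih rest [] (cur.reverse :: acc) h, pvSplitA]
      · rw [show PySem.Chars.splitOn.go ['"'] (n+1) (c :: rest) cur acc
              = PySem.Chars.splitOn.go ['"'] n rest (c :: cur) acc from by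
            simp [PySem.Chars.splitOn.go, List.isPrefixOf, Ne.symm hc]]
        simp [ih rest (c :: cur) acc h, pvSplitA, hc]

theorem pvSplitOn_eq (l : List Char) :
    PySem.Chars.splitOn l ['"'] = pvSplitA l [] := by
  have := pvSplitGo_eq (l.length + 1) l [] [] (Nat.le_succ _)
  simpa [PySem.Chars.splitOn] using this

theorem pvAfold_eq (parts : List (List Char)) (b : Bool) (out : List (List Char)) :
    (parts.foldl pvAStep (b, out)).2 = out ++ pvAltMap parts b := by
  induction parts generalizing b out with
  | nil => simp [pvAltMap]
  | cons p ps ih =>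
    rw [List.foldl_cons,
      show pvAStep (b, out) p
        = (!b, out ++ [if b then p else PySem.Chars.replace p [','] []]) from rfl, ih]
    cases b <;> simp [pvAltMap, pvReplace_eq]

theorem pvBfold_eq (cs : List Char) (b : Bool) (out : List Char) :
    (cs.foldl pvBStep (b, out)).2 = out ++ pvScan cs b := by
  induction cs generalizing b out with
  | nil => simp [pvScan]
  | cons c rest ih =>
    rw [List.foldl_cons]
    by_cases hc : c = '"'
    · subst hc
      rw [show pvBStep (b, out) '"' = (!b, out ++ ['"']) from rfl, ih]
      simp [pvScan]
    · by_cases hcomma : c = ','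
      · subst hcomma
        cases b with
        | false =>
          rw [show pvBStep (false, out) ',' = (false, out) from by
            simp [pvBStep], ih]
          simp [pvScan, hc]
        | true =>
          rw [show pvBStep (true, out) ',' = (true, out ++ [',']) from by
            simp [pvBStep], ih]
          simp [pvScan, hc]
      · rw [show pvBStep (b, out) c = (b, out ++ [c]) from by
          simp [pvBStep, hc, hcomma], ih]
        simp [pvScan, hc, hcomma]

theorem pvSplitA_ne_nil (l cur : List Char) : pvSplitA l cur ≠ [] := by
  induction l generalizing cur with
  | nil => simp [pvSplitA]
  | cons c rest ih => by_cases hc : c = '"' <;> simp [pvSplitA, hc, ih]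

theorem pvAltMap_ne_nil (ps : List (List Char)) (b : Bool) (h : ps ≠ []) :
    pvAltMap ps b ≠ [] := by
  cases ps with
  | nil => exact absurd rfl h
  | cons p ps => simp [pvAltMap]

theorem pvIntercalate_cons_cons (sep x y : List Char) (zs : List (List Char)) :
    sep.intercalate (x :: y :: zs) = x ++ sep ++ sep.intercalate (y :: zs) := by
  simp [List.intercalate, List.intersperse]

/-- Key invariant: joining A's alternately-stripped pieces of `pvSplitA l cur`
equals the (possibly stripped) pending piece followed by B's scan of `l`. -/
theorem pvKey (l : List Char) (cur : List Char) (b : Bool) :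
    List.intercalate ['"'] (pvAltMap (pvSplitA l cur) b)
      = (if b then cur.reverse else pvRemoveC cur.reverse) ++ pvScan l b := by
  induction l generalizing cur b with
  | nil => cases b <;> simp [pvSplitA, pvAltMap, pvScan, List.intercalate]
  | cons c rest ih =>
    by_cases hc : c = '"'
    · subst hc
      have hne : pvAltMap (pvSplitA rest []) (!b) ≠ [] :=
        pvAltMap_ne_nil _ _ (pvSplitA_ne_nil rest [])
      obtain ⟨y, zs, hyz⟩ := List.exists_cons_of_ne_nil hne
      rw [show pvSplitA ('"' :: rest) cur = cur.reverse :: pvSplitA rest [] from by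
        simp [pvSplitA]]
      rw [show pvAltMap (cur.reverse :: pvSplitA rest []) b
            = (if b then cur.reverse else pvRemoveC cur.reverse) :: pvAltMap (pvSplitA rest []) (!b) from rfl]
      rw [hyz, pvIntercalate_cons_cons, ← hyz, ih [] (!b)]
      cases b <;> simp [pvScan, pvRemoveC]
    · rw [show pvSplitA (c :: rest) cur = pvSplitA rest (c :: cur) from by simp [pvSplitA, hc]]
      rw [ih (c :: cur) b]
      by_cases hcomma : c = ','
      · subst hcomma
        cases b <;> simp [pvScan, hc, pvRemoveC_append, pvRemoveC]
      · cases b <;> simp [pvScan, hc, hcomma, pvRemoveC_append, pvRemoveC]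

-- ===== VERDICT (by name: the statement is the Claim_ definition above) =====
theorem exciseUnquotedCommas_spec : Claim_equal_exciseUnquotedCommas := by
  intro s _
  unfold Spec_exciseUnquotedCommas exciseUnquotedCommas exciseUnquotedCommas_alt
  simp only [pvSplitOn_eq, pvAfold_eq, pvBfold_eq, List.nil_append]
  rw [show PySem.Chars.join ['"'] (pvAltMap (pvSplitA s.toList []) false)
        = List.intercalate ['"'] (pvAltMap (pvSplitA s.toList []) false) from rfl]
  rw [pvKey s.toList [] false]
  simp [pvRemoveC]
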